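-- pv_equiv track=rewrite | github.com/MinhxNguyen7/leetcode | hackerrank/alternating_binary_substring_with_flips.py | max_length_with_start
-- ===== SOURCE A (Python) =====
-- from typing import Literal
--
-- zero_one_t = Literal["0", "1"]
--
-- def calculate_expected(index: int, start: zero_one_t) -> zero_one_t:
--     if not index % 2:
--         return start
--
--     return "1" if start == "0" else "0"
--
-- def max_length_with_start(s: str, k: int, start: zero_one_t):
--     left = 0
--     max_len = 0
--
--     for right in range(len(s)):
--         if s[right] != calculate_expected(right, start):
--             k -= 1
--
--         # Shrink substring until a wrong character encountered to recover flip
--         while k < 0: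
--             if s[left] != calculate_expected(left, start):
--                 k += 1
--             left += 1
--
--         max_len = max(max_len, right - left + 1)
--
--     return max_len
-- ===== SOURCE B (Python) =====
-- def calculate_expected(index, start):
--     if not index % 2:
--         return start
--     return "1" if start == "0" else "0"
--
-- def max_length_with_start(s, k, start):
--     # One pass: record every mismatch position; the window ending at `right`
--     # must start just after the (m-k)-th most recent mismatch.
--     pos = []  # indices where s differs from the expected alternating pattern
--     best = 0
--     for right in range(len(s)):
--         if s[right] != calculate_expected(right, start):
--             pos.append(right)
--         over = len(pos) - k  # mismatches beyond the flip budget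
--         left = 0 if over <= 0 else pos[over - 1] + 1
--         best = max(best, right - left + 1)
--     return best
-- ===== Notes on version B (the rewrite author's own statement) =====
-- stated objective: alternative
-- what changed: Replaced the amortized two-pointer shrink loop with a single pass that records every mismatch position and computes each window's start directly as (position of the (m-k)-th mismatch)+1, with no inner while loop.
import Mathlib
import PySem

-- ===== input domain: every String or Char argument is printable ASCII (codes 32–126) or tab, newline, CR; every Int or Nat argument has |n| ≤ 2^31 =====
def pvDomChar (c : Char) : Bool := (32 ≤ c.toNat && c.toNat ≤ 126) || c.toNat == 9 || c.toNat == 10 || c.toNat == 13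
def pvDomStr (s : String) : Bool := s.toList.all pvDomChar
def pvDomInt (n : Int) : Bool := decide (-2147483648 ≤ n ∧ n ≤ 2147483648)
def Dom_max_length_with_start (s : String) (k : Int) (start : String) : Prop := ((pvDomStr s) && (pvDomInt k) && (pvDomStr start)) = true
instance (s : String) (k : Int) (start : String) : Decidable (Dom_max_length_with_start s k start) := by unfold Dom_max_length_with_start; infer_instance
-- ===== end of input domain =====

-- B replaces A's amortized two-pointer shrink loop by a one-pass index of mismatch
-- positions from which each window start is computed directly (alternative algorithm,
-- same asymptotic cost); equivalence is proved on Pre_ (k ≥ 0 or s empty).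

-- ===== PORT A =====
-- shared helper: Python's calculate_expected (used verbatim by both Pythons)
def calcExpected (index : Nat) (start : String) : String :=
  if index % 2 = 0 then start else if start = "0" then "1" else "0"

-- s[i] as the 1-character Python string ("" never reached on indices used inside Pre_)
def charAtStr (cs : List Char) (i : Nat) : String := (cs[i]?.elim "" String.singleton)

-- the test `s[i] != calculate_expected(i, start)` appearing verbatim in both Pythons
def mism (cs : List Char) (start : String) (i : Nat) : Bool :=
  decide (charAtStr cs i ≠ calcExpected i start)

-- A's inner `while k < 0` shrink loop (stops instead of raising past the end; such
-- inputs are excluded by Pre_)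
def pvShrinkA (cs : List Char) (start : String) (left : Nat) (kc : Int) : Nat × Int :=
  if h : kc < 0 ∧ left < cs.length then
    pvShrinkA cs start (left + 1) (kc + (if mism cs start left then 1 else 0))
  else (left, kc)
termination_by cs.length - left
decreasing_by omega

-- A's for-loop body; state = (left, k, max_len)
def stepA (cs : List Char) (start : String) (st : Nat × Int × Int) (right : Nat) :
    Nat × Int × Int :=
  let kc := st.2.1 - (if mism cs start right then 1 else 0)
  let p := pvShrinkA cs start st.1 kc
  (p.1, p.2, max st.2.2 ((right : Int) - (p.1 : Int) + 1))

def max_length_with_start (s : String) (k : Int) (start : String) : Int :=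
  ((List.range s.toList.length).foldl (stepA s.toList start) (0, k, 0)).2.2

-- ===== PORT B =====
-- B's for-loop body; state = (pos, best); pos[ov-1] via pyGet? (in range inside Pre_)
def stepB (cs : List Char) (start : String) (k : Int) (st : List Nat × Int) (right : Nat) :
    List Nat × Int :=
  let pos := if mism cs start right then st.1 ++ [right] else st.1
  let ov : Int := (pos.length : Int) - k
  let left : Int := if ov ≤ 0 then 0 else (((PySem.List.pyGet? pos (ov - 1)).getD 0 : Nat) : Int) + 1
  (pos, max st.2 ((right : Int) - left + 1))

def max_length_with_start_alt (s : String) (k : Int) (start : String) : Int :=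
  ((List.range s.toList.length).foldl (stepB s.toList start k) ([], 0)).2

-- ===== PRECONDITION & SPEC =====
-- Pre_ excludes negative k with a nonempty s: there A's recovery loop always ends up
-- reading past the end of the string and raises IndexError (it never returns).
def Pre_max_length_with_start (s : String) (k : Int) (start : String) : Prop :=
  0 ≤ k ∨ s = ""
instance (s : String) (k : Int) (start : String) :
    Decidable (Pre_max_length_with_start s k start) := by
  unfold Pre_max_length_with_start; infer_instance

def pvWitness_max_length_with_start : String × Int × String := ("0101", 1, "0")

def Spec_max_length_with_start (s : String) (k : Int) (start : String) (out : Int) : Prop :=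
  out = max_length_with_start_alt s k start
instance (s : String) (k : Int) (start : String) (out : Int) :
    Decidable (Spec_max_length_with_start s k start out) := by
  unfold Spec_max_length_with_start; infer_instance

-- ===== CLAIM (what is proved, stated in full; the proofs are below) =====
def Claim_equal_max_length_with_start : Prop :=
  ∀ (s : String) (k : Int) (start : String), Dom_max_length_with_start s k start →
    Pre_max_length_with_start s k start →
    Spec_max_length_with_start s k start (max_length_with_start s k start)

-- ===== LEMMAS AND PROOFS =====

-- window start dictated by the mismatch-position list P (B's formula, Nat-valued)
def leftOf (K : Nat) (P : List Nat) : Nat :=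
  if P.length ≤ K then 0 else P.getD (P.length - K - 1) 0 + 1

-- A's flip budget after the shrink, as a function of P
def kcOf (K : Nat) (P : List Nat) : Int := (K : Int) - (min P.length K : Nat)

lemma shrink_noop (cs : List Char) (start : String) (left : Nat) (kc : Int)
    (h : 0 ≤ kc) : pvShrinkA cs start left kc = (left, kc) := by
  unfold pvShrinkA
  rw [dif_neg]; omega

lemma shrink_finds (cs : List Char) (start : String) (left j0 : Nat)
    (h1 : left ≤ j0) (h2 : j0 < cs.length) (h3 : mism cs start j0 = true)
    (h4 : ∀ j, left ≤ j → j < j0 → mism cs start j = false) :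
    pvShrinkA cs start left (-1) = (j0 + 1, 0) := by
  have key : ∀ n left, left ≤ j0 → j0 - left = n →
      (∀ j, left ≤ j → j < j0 → mism cs start j = false) →
      pvShrinkA cs start left (-1) = (j0 + 1, 0) := by
    intro n
    induction n with
    | zero =>
      intro left hle hn _
      have heq : left = j0 := by omega
      subst heq
      rw [pvShrinkA, dif_pos ⟨by norm_num, by omega⟩]
      simp only [h3, if_true]
      rw [show (-1 : Int) + 1 = 0 from by norm_num]
      exact shrink_noop _ _ _ _ le_rfl
    | succ n ih =>
      intro left hle hn hmin
      have hlt : left < j0 := by omega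
      rw [pvShrinkA, dif_pos ⟨by norm_num, by omega⟩]
      rw [hmin left le_rfl hlt]
      simp only [Bool.false_eq_true, if_false]
      rw [show (-1 : Int) + 0 = -1 from by norm_num]
      exact ih (left + 1) (by omega) (by omega) (fun j hj1 hj2 => hmin j (by omega) hj2)
  exact key (j0 - left) left h1 rfl h4

lemma P_pairwise (c : Nat → Bool) (n : Nat) :
    ((List.range n).filter c).Pairwise (· < ·) :=
  List.Pairwise.filter c (List.pairwise_lt_range)

lemma P_mem (c : Nat → Bool) (n i : Nat) :
    i ∈ (List.range n).filter c ↔ i < n ∧ c i = true := by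
  simp [List.mem_filter]

lemma P_succ (c : Nat → Bool) (n : Nat) :
    (List.range (n + 1)).filter c
      = (List.range n).filter c ++ (if c n then [n] else []) := by
  rcases h : c n <;> simp [List.range_succ, h]

-- B's Int-valued window-start expression equals leftOf
lemma leftB_eq (K : Nat) (P : List Nat) :
    (if ((P.length : Int) - (K : Int) ≤ 0) then (0 : Int)
     else (((PySem.List.pyGet? P (((P.length : Int) - (K : Int)) - 1)).getD 0 : Nat) : Int) + 1)
      = (leftOf K P : Int) := by
  unfold leftOf
  by_cases h : P.length ≤ K
  · rw [if_pos (by omega), if_pos h]; simp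
  · rw [if_neg (by omega), if_neg h]
    have h1 : ((P.length : Int) - (K : Int)) - 1 = ((P.length - K - 1 : Nat) : Int) := by
      omega
    have h2 : P.length - K - 1 < P.length := by omega
    rw [h1, PySem.List.pyGet?_natCast, List.getElem?_eq_getElem h2]
    rw [List.getD_eq_getElem?_getD, List.getElem?_eq_getElem h2]
    simp

-- the main invariant: after folding range r, A's state is (leftOf P, kcOf P, best)
-- and B's state is (P, best), where P = mismatch positions below r
lemma fold_invariant (cs : List Char) (start : String) (K : Nat) (r : Nat)
    (hr : r ≤ cs.length) :
    ((List.range r).foldl (stepB cs start (K : Int)) ([], 0)).1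
        = (List.range r).filter (fun i => mism cs start i) ∧
    (List.range r).foldl (stepA cs start) (0, (K : Int), 0)
        = (leftOf K ((List.range r).filter (fun i => mism cs start i)),
           kcOf K ((List.range r).filter (fun i => mism cs start i)),
           ((List.range r).foldl (stepB cs start (K : Int)) ([], 0)).2) := by
  induction r with
  | zero => simp [leftOf, kcOf]
  | succ r ih =>
    obtain ⟨ihB, ihA⟩ := ih (by omega)
    have hB : (List.range r).foldl (stepB cs start (K : Int)) ([], 0)
        = ((List.range r).filter (fun i => mism cs start i),
           ((List.range r).foldl (stepB cs start (K : Int)) ([], 0)).2) := by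
      exact Prod.ext ihB rfl
    set P := (List.range r).filter (fun i => mism cs start i) with hPdef
    set bb := ((List.range r).foldl (stepB cs start (K : Int)) ([], 0)).2 with hbb
    rw [List.range_succ, List.foldl_append, List.foldl_append, hB, ihA,
      List.foldl_cons, List.foldl_nil, List.foldl_cons, List.foldl_nil]
    rw [List.filter_append]
    have hkc_nonneg : 0 ≤ kcOf K P := by unfold kcOf; push_cast; omega
    rcases hcr : mism cs start r with _ | _
    · -- no mismatch at r: P unchanged, no shrink
      have hfil : List.filter (fun i => mism cs start i) [r] = [] := by simp [hcr]
      rw [hfil, List.append_nil]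
      simp only [stepA, stepB, hcr, Bool.false_eq_true, if_false]
      rw [show kcOf K P - 0 = kcOf K P from by ring, shrink_noop cs start _ _ hkc_nonneg]
      refine ⟨rfl, ?_⟩
      rw [leftB_eq K P]
    · -- mismatch at r: P grows by [r]
      have hfil : List.filter (fun i => mism cs start i) [r] = [r] := by simp [hcr]
      rw [hfil]
      have hQ : (List.range (r + 1)).filter (fun i => mism cs start i) = P ++ [r] := by
        rw [P_succ]; simp [hcr]
        exact hPdef.symm
      have hQlen : (P ++ [r]).length = P.length + 1 := by simp
      have hpw : (P ++ [r]).Pairwise (· < ·) := hQ ▸ P_pairwise _ (r + 1)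
      have hmono := List.pairwise_iff_getElem.mp hpw
      have hmemQ : ∀ i, i ∈ P ++ [r] ↔ i < r + 1 ∧ mism cs start i = true := by
        intro i; rw [← hQ]; exact P_mem _ _ _
      simp only [stepA, stepB, hcr, if_true]
      by_cases hmK : P.length < K
      · -- budget not exhausted: no shrink
        have h1 : 0 ≤ kcOf K P - 1 := by unfold kcOf; push_cast; omega
        rw [shrink_noop cs start _ _ h1]
        have hL : leftOf K P = leftOf K (P ++ [r]) := by
          unfold leftOf
          rw [if_pos (by omega), if_pos (by rw [hQlen]; omega)]
        have hk : kcOf K P - 1 = kcOf K (P ++ [r]) := by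
          unfold kcOf; rw [hQlen]; push_cast; omega
        refine ⟨rfl, ?_⟩
        rw [leftB_eq K (P ++ [r]), hL, hk]
      · -- budget exhausted: kc hits -1 and the shrink loop runs
        have hKm : K ≤ P.length := by omega
        have hkc0 : kcOf K P = 0 := by unfold kcOf; push_cast; omega
        have hidx : P.length - K < (P ++ [r]).length := by rw [hQlen]; omega
        set j0 := (P ++ [r])[P.length - K] with hj0
        have hj0mem : j0 ∈ P ++ [r] := List.getElem_mem _
        have hj0r : j0 < r + 1 := ((hmemQ j0).mp hj0mem).1
        have hj0m : mism cs start j0 = true := ((hmemQ j0).mp hj0mem).2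
        have hle : leftOf K P ≤ j0 := by
          unfold leftOf
          by_cases h : P.length ≤ K
          · rw [if_pos h]; omega
          · rw [if_neg h]
            have hi1 : P.length - K - 1 < P.length := by omega
            rw [List.getD_eq_getElem _ _ hi1]
            have : P[P.length - K - 1] = (P ++ [r])[P.length - K - 1]'(by rw [hQlen]; omega) := by
              rw [List.getElem_append_left]
            rw [this]
            have := hmono (P.length - K - 1) (P.length - K) (by rw [hQlen]; omega) hidx (by omega)
            omega
        have hmin : ∀ j, leftOf K P ≤ j → j < j0 → mism cs start j = false := by
          intro j hjl hjlt
          by_contra hc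
          have hcj : mism cs start j = true := by
            rcases h' : mism cs start j with _ | _
            · exact absurd h' hc
            · rfl
          have hjmem : j ∈ P ++ [r] := (hmemQ j).mpr ⟨by omega, hcj⟩
          obtain ⟨t, ht, hPt⟩ := List.getElem_of_mem hjmem
          have htlt : t < P.length - K := by
            by_contra htge
            rcases Nat.lt_or_ge (P.length - K) t with h1 | h1
            · have := hmono (P.length - K) t hidx ht h1
              omega
            · have : t = P.length - K := by omega
              subst this; omega
          have hK1 : K < P.length := by omega
          have hlo : leftOf K P = P[P.length - K - 1]'(by omega) + 1 := by
            unfold leftOf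
            rw [if_neg (by omega), List.getD_eq_getElem _ _ (by omega : P.length - K - 1 < P.length)]
          have hQt : (P ++ [r])[t] ≤ (P ++ [r])[P.length - K - 1]'(by rw [hQlen]; omega) := by
            rcases Nat.lt_or_ge t (P.length - K - 1) with h1 | h1
            · exact le_of_lt (hmono t (P.length - K - 1) ht (by rw [hQlen]; omega) h1)
            · have : t = P.length - K - 1 := by omega
              subst this; exact le_rfl
          have hPP : (P ++ [r])[P.length - K - 1]'(by rw [hQlen]; omega) = P[P.length - K - 1]'(by omega) := by
            rw [List.getElem_append_left]
          omega
        have hshr := shrink_finds cs start (leftOf K P) j0 hle (by omega) hj0m hmin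
        rw [show kcOf K P - 1 = -1 from by rw [hkc0]; ring, hshr]
        have hLQ : leftOf K (P ++ [r]) = j0 + 1 := by
          unfold leftOf
          rw [if_neg (by rw [hQlen]; omega)]
          rw [List.getD_eq_getElem _ _ (by rw [hQlen]; omega : (P ++ [r]).length - K - 1 < (P ++ [r]).length)]
          have : (P ++ [r]).length - K - 1 = P.length - K := by rw [hQlen]; omega
          simp only [this]
          rfl
        have hkQ : kcOf K (P ++ [r]) = 0 := by unfold kcOf; rw [hQlen]; push_cast; omega
        refine ⟨rfl, ?_⟩
        rw [leftB_eq K (P ++ [r]), hLQ, hkQ]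

-- ===== VERDICT (by name: the statement is the Claim_ definition above) =====
theorem max_length_with_start_spec : Claim_equal_max_length_with_start := by
  intro s k start _ hpre
  unfold Spec_max_length_with_start
  rcases hpre with hk | hs
  · have hK : k = ((k.toNat : Nat) : Int) := by omega
    rw [max_length_with_start, max_length_with_start_alt, hK,
      (fold_invariant s.toList start k.toNat s.toList.length le_rfl).2]
  · subst hs; rfl
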